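-- pv_equiv track=rewrite | github.com/DeepSoftwareAnalytics/CommitMsgEmpirical | dataset/other_dataset_preprocessing/data4CopynetV3.py | mark_token
-- ===== SOURCE A (Python) =====
-- def mark_token(marklist, tokenlist, attlist):
--     lineNum = 0
--     diff_mark = list()
--     for i in tokenlist:
--         if lineNum < len(marklist):
--             diff_mark.append(marklist[lineNum]) ###
--         else:
--             diff_mark.append(2) ###
--             # logger.debug(marklist, tokenlist, attlist)
--         if i == '<nl>':
--             lineNum += 1
--     while lineNum < len(marklist):
--         diff_mark.append(marklist[lineNum])
--         tokenlist.append('<nl>')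
--         attlist.append([])
--         lineNum += 1
--     return diff_mark, tokenlist, attlist
-- ===== SOURCE B (Python) =====
-- def mark_token(marklist, tokenlist, attlist):
--     # split tokenlist into per-line segments; each segment ends at (and includes)
--     # its '<nl>', plus one trailing segment for tokens after the last '<nl>'
--     segments = []
--     cur = []
--     for t in tokenlist:
--         cur.append(t)
--         if t == '<nl>':
--             segments.append(cur)
--             cur = []
--     segments.append(cur)
--     diff_mark = []
--     for j, seg in enumerate(segments):
--         m = marklist[j] if j < len(marklist) else 2
--         diff_mark.extend([m] * len(seg))
--     # marks of lines missing from tokenlist: pad with empty lines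
--     extra = marklist[len(segments) - 1:]
--     diff_mark.extend(extra)
--     tokenlist.extend(['<nl>'] * len(extra))
--     attlist.extend([[]] * len(extra))
--     return diff_mark, tokenlist, attlist
-- ===== Notes on version B (the rewrite author's own statement) =====
-- stated objective: alternative
-- what changed: B partitions tokenlist into per-line segments ending at each '<nl>' and assigns one mark per segment (outer loop over lines, inner extend per token), then handles leftover marks with a slice and bulk extends instead of A's flat per-token counter pass and trailing while loop.
import Mathlib
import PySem

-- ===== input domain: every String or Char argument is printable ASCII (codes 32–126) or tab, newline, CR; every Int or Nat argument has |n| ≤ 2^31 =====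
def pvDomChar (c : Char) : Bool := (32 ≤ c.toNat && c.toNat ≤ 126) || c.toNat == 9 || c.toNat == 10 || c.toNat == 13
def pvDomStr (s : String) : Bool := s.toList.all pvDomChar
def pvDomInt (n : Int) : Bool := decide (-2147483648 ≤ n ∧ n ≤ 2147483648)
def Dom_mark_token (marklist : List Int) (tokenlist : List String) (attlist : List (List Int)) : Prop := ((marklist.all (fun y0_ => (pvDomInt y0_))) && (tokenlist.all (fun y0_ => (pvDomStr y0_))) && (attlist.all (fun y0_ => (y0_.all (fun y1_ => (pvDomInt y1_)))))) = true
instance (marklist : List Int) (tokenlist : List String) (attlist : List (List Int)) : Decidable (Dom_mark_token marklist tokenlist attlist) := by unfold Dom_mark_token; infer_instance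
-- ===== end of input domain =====

-- B replaces A's flat per-token counter pass by a per-line segmentation (outer loop over
-- line segments, inner extend per segment) and a slice instead of the trailing while loop;
-- objective: alternative decomposition. Mutation of tokenlist/attlist in Python is mirrored
-- in both B's appends; equivalence here is about the returned triple.

-- ===== PORT A =====
-- the for-loop over tokenlist: state (lineNum, diff_mark)
def markTokenLoop (marklist : List Int) : List String → Nat → List Int → Nat × List Int
  | [], n, acc => (n, acc)
  | i :: rest, n, acc =>
      let acc := if n < marklist.length then acc ++ [marklist.getD n 0] else acc ++ [2]
      let n := if i = "<nl>" then n + 1 else n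
      markTokenLoop marklist rest n acc

-- the trailing while loop
def markTokenTail (marklist : List Int) (n : Nat) (dm : List Int) (tl : List String) (al : List (List Int)) : List Int × List String × List (List Int) :=
  if _h : n < marklist.length then
    markTokenTail marklist (n + 1) (dm ++ [marklist.getD n 0]) (tl ++ ["<nl>"]) (al ++ [[]])
  else (dm, tl, al)
termination_by marklist.length - n

def mark_token (marklist : List Int) (tokenlist : List String) (attlist : List (List Int)) : List Int × List String × List (List Int) :=
  let st := markTokenLoop marklist tokenlist 0 []
  markTokenTail marklist st.1 st.2 tokenlist attlist

-- ===== PORT B =====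
-- split tokenlist into per-line segments, each ending at (and including) its '<nl>'
def segsLoop : List String → List (List String) → List String → List (List String)
  | [], segs, cur => segs ++ [cur]
  | t :: rest, segs, cur =>
      let cur := cur ++ [t]
      if t = "<nl>" then segsLoop rest (segs ++ [cur]) []
      else segsLoop rest segs cur

-- the enumerate loop: one mark per token of segment j
def extendLoop (marklist : List Int) : List (List String) → Nat → List Int → List Int
  | [], _, dm => dm
  | seg :: rest, j, dm =>
      let m := if j < marklist.length then marklist.getD j 0 else 2
      extendLoop marklist rest (j + 1) (dm ++ List.replicate seg.length m)

def mark_token_alt (marklist : List Int) (tokenlist : List String) (attlist : List (List Int)) : List Int × List String × List (List Int) :=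
  let segs := segsLoop tokenlist [] []
  let dm := extendLoop marklist segs 0 []
  let extra := marklist.drop (segs.length - 1)
  (dm ++ extra, tokenlist ++ List.replicate extra.length "<nl>", attlist ++ List.replicate extra.length [])

-- ===== PRECONDITION & SPEC =====
def Spec_mark_token (marklist : List Int) (tokenlist : List String) (attlist : List (List Int)) (out : List Int × List String × List (List Int)) : Prop := out = mark_token_alt marklist tokenlist attlist
instance (marklist : List Int) (tokenlist : List String) (attlist : List (List Int)) (out : List Int × List String × List (List Int)) : Decidable (Spec_mark_token marklist tokenlist attlist out) := by unfold Spec_mark_token; infer_instance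

-- ===== CLAIM (what is proved, stated in full; the proofs are below) =====
def Claim_equal_mark_token : Prop := ∀ (marklist : List Int) (tokenlist : List String) (attlist : List (List Int)), Dom_mark_token marklist tokenlist attlist → Spec_mark_token marklist tokenlist attlist (mark_token marklist tokenlist attlist)

-- ===== LEMMAS AND PROOFS =====

-- the per-token mark sequence starting at line n (common characterisation)
def specDM (marklist : List Int) : List String → Nat → List Int
  | [], _ => []
  | t :: ts, n => (if n < marklist.length then marklist.getD n 0 else 2) :: specDM marklist ts (if t = "<nl>" then n + 1 else n)

theorem markTokenLoop_eq (marklist : List Int) (ts : List String) :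
    ∀ n acc, markTokenLoop marklist ts n acc = (n + ts.count "<nl>", acc ++ specDM marklist ts n) := by
  induction ts with
  | nil => intro n acc; simp [markTokenLoop, specDM]
  | cons t rest ih =>
      intro n acc
      simp only [markTokenLoop, specDM, ih, List.count_cons]
      by_cases h : t = "<nl>" <;> by_cases h2 : n < marklist.length <;>
        simp [h, h2, Prod.ext_iff, List.append_assoc] <;> omega

theorem markTokenTail_eq (marklist : List Int) : ∀ n dm tl al,
    markTokenTail marklist n dm tl al =
      (dm ++ marklist.drop n, tl ++ List.replicate (marklist.drop n).length "<nl>",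
        al ++ List.replicate (marklist.drop n).length []) := by
  intro n
  induction hn : marklist.length - n generalizing n with
  | zero =>
      intro dm tl al
      rw [markTokenTail]
      have h1 : ¬ n < marklist.length := by omega
      have h2 : marklist.length ≤ n := by omega
      simp [h1, List.drop_of_length_le h2]
  | succ k ih =>
      intro dm tl al
      have hlt : n < marklist.length := by omega
      rw [markTokenTail]
      simp only [hlt, dif_pos]
      rw [ih (n + 1) (by omega)]
      have hd : marklist.drop n = marklist.getD n 0 :: marklist.drop (n + 1) := by
        rw [List.drop_eq_getElem_cons hlt, List.getD_eq_getElem marklist 0 hlt]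
      simp [hd, List.replicate_succ]

theorem segsLoop_append (ts : List String) :
    ∀ segs cur, segsLoop ts segs cur = segs ++ segsLoop ts [] cur := by
  induction ts with
  | nil => intro segs cur; simp [segsLoop]
  | cons t rest ih =>
      intro segs cur
      simp only [segsLoop]
      by_cases h : t = "<nl>"
      · simp only [h, if_true]
        rw [ih (segs ++ [cur ++ ["<nl>"]]), ih ([] ++ [cur ++ ["<nl>"]])]; simp
      · simp only [h, if_false]
        exact ih segs (cur ++ [t])

theorem segsLoop_length (ts : List String) :
    ∀ cur, (segsLoop ts [] cur).length = ts.count "<nl>" + 1 := by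
  induction ts with
  | nil => intro cur; simp [segsLoop]
  | cons t rest ih =>
      intro cur
      simp only [segsLoop, List.count_cons]
      by_cases h : t = "<nl>"
      · simp only [h, if_true]
        rw [segsLoop_append, List.length_append, ih]; simp; omega
      · simp only [h, if_false]
        rw [ih]; simp [h]

theorem extendLoop_append (marklist : List Int) (s1 : List (List String)) :
    ∀ s2 j dm, extendLoop marklist (s1 ++ s2) j dm =
      extendLoop marklist s2 (j + s1.length) (extendLoop marklist s1 j dm) := by
  induction s1 with
  | nil => intro s2 j dm; simp [extendLoop]
  | cons seg rest ih =>
      intro s2 j dm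
      simp only [List.cons_append, extendLoop, ih, List.length_cons]
      congr 1
      omega

theorem extendLoop_segs (marklist : List Int) (ts : List String) :
    ∀ cur j dm, extendLoop marklist (segsLoop ts [] cur) j dm =
      dm ++ List.replicate cur.length (if j < marklist.length then marklist.getD j 0 else 2)
         ++ specDM marklist ts j := by
  induction ts with
  | nil => intro cur j dm; simp [segsLoop, extendLoop, specDM]
  | cons t rest ih =>
      intro cur j dm
      simp only [segsLoop]
      by_cases h : t = "<nl>"
      · simp only [h, if_true]
        have hone : ∀ d : List Int, extendLoop marklist [cur ++ ["<nl>"]] j d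
            = d ++ List.replicate (cur ++ ["<nl>"]).length (if j < marklist.length then marklist.getD j 0 else 2) := by
          intro d; simp [extendLoop]
        rw [segsLoop_append, extendLoop_append]
        simp only [List.nil_append]
        rw [hone, ih []]
        simp [specDM, List.replicate_succ', List.append_assoc]
      · simp only [h, if_false]
        rw [ih (cur ++ [t]) j]
        simp [specDM, h, List.replicate_succ', List.append_assoc]

-- ===== VERDICT (by name: the statement is the Claim_ definition above) =====
theorem mark_token_spec : Claim_equal_mark_token := by
  intro marklist tokenlist attlist _
  show mark_token marklist tokenlist attlist = mark_token_alt marklist tokenlist attlist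
  simp only [mark_token, mark_token_alt]
  simp only [markTokenLoop_eq, markTokenTail_eq, extendLoop_segs, segsLoop_length]
  simp
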